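-- pv_equiv track=rewrite | github.com/mjovanovic9999/Blockade | Implementacija/moves.py | is_wall_connected_with_two_or_more_walls
-- ===== SOURCE A (Python) =====
-- def is_wall_connected_with_two_or_more_walls(wall: tuple[int, int],
--                                              is_horizontal: bool,
--                                              table_size: tuple[int, int],
--                                              walls: tuple[tuple[tuple[int, int], ...], tuple[tuple[int, int], ...]]) -> bool:
--
--     if is_horizontal:
--         left_neighbor = wall[1] == 1
--         right_neighbor = wall[1] + 1 == table_size[1]
--         middle_neighbor = False
--         for horizontal_wall in walls[1]:
--             if not left_neighbor and horizontal_wall[0] == wall[0] and horizontal_wall[1] == wall[1] - 2: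
--                 left_neighbor = True
--             if not right_neighbor and horizontal_wall[0] == wall[0] and horizontal_wall[1] == wall[1] + 2:
--                 right_neighbor = True
--             counter = 0
--             for neighbor in [left_neighbor, middle_neighbor, right_neighbor]:
--                 if neighbor:
--                     counter += 1
--             if counter >= 2:
--                 return True
--
--         for vertical_wall in walls[0]:
--             if not left_neighbor and vertical_wall[1] == wall[1] - 1 and (vertical_wall[0] == wall[0] or vertical_wall[0] == wall[0] - 1 or vertical_wall[0] == wall[0] + 1):
--                 left_neighbor = True
--             if not right_neighbor and vertical_wall[1] == wall[1] + 1 and (vertical_wall[0] == wall[0] or vertical_wall[0] == wall[0] - 1 or vertical_wall[0] == wall[0] + 1):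
--                 right_neighbor = True
--             if vertical_wall[1] == wall[1] and (vertical_wall[0] == wall[0] + 1 or vertical_wall[0] == wall[0] - 1):
--                 middle_neighbor = True
--             counter = 0
--             for neighbor in [left_neighbor, middle_neighbor, right_neighbor]:
--                 if neighbor:
--                     counter += 1
--             if counter >= 2:
--                 return True
--     else:
--         top_neighbor = wall[0] == 1
--         bottom_neighbor = wall[0] + 1 == table_size[0]
--         middle_neighbor = False
--         for horizontal_wall in walls[1]:
--             if not top_neighbor and horizontal_wall[0] == wall[0] - 1 and (horizontal_wall[1] == wall[1] or horizontal_wall[1] == wall[1] - 1 or horizontal_wall[1] == wall[1] + 1):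
--                 top_neighbor = True
--             if not bottom_neighbor and horizontal_wall[0] == wall[0] + 1 and (horizontal_wall[1] == wall[1] or horizontal_wall[1] == wall[1] - 1 or horizontal_wall[1] == wall[1] + 1):
--                 bottom_neighbor = True
--             if horizontal_wall[0] == wall[0] and (horizontal_wall[1] == wall[1] + 1 or horizontal_wall[1] == wall[1] - 1):
--                 middle_neighbor = True
--             counter = 0
--             for neighbor in [top_neighbor, middle_neighbor, bottom_neighbor]:
--                 if neighbor:
--                     counter += 1
--             if counter >= 2:
--                 return True
--         for vertical_wall in walls[0]:
--             if not top_neighbor and vertical_wall[1] == wall[1] and vertical_wall[0] == wall[0] - 2: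
--                 top_neighbor = True
--             if not bottom_neighbor and vertical_wall[1] == wall[1] and vertical_wall[0] == wall[0] + 2:
--                 bottom_neighbor = True
--             counter = 0
--             for neighbor in [top_neighbor, middle_neighbor, bottom_neighbor]:
--                 if neighbor:
--                     counter += 1
--             if counter >= 2:
--                 return True
--     return False
-- ===== SOURCE B (Python) =====
-- def is_wall_connected_with_two_or_more_walls(wall: tuple[int, int],
--                                              is_horizontal: bool,
--                                              table_size: tuple[int, int],
--                                              walls: tuple[tuple[tuple[int, int], ...], tuple[tuple[int, int], ...]]) -> bool:
--     vertical, horizontal = walls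
--     r, c = wall
--     if is_horizontal:
--         first = (c == 1 or (r, c - 2) in horizontal
--                  or (r - 1, c - 1) in vertical or (r, c - 1) in vertical or (r + 1, c - 1) in vertical)
--         middle = (r - 1, c) in vertical or (r + 1, c) in vertical
--         second = (c + 1 == table_size[1] or (r, c + 2) in horizontal
--                   or (r - 1, c + 1) in vertical or (r, c + 1) in vertical or (r + 1, c + 1) in vertical)
--     else:
--         first = (r == 1 or (r - 2, c) in vertical
--                  or (r - 1, c - 1) in horizontal or (r - 1, c) in horizontal or (r - 1, c + 1) in horizontal)
--         middle = (r, c - 1) in horizontal or (r, c + 1) in horizontal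
--         second = (r + 1 == table_size[0] or (r + 2, c) in vertical
--                   or (r + 1, c - 1) in horizontal or (r + 1, c) in horizontal or (r + 1, c + 1) in horizontal)
--     return first + middle + second >= 2
-- ===== Notes on version B (the rewrite author's own statement) =====
-- stated objective: simpler
-- what changed: B eliminates A's two scanning loops with mutable flags and an in-loop counter check, computing the three neighbor flags directly as fixed-coordinate membership tests on the wall lists and comparing their sum to 2.
-- intended difference: When both wall lists are empty and the wall is adjacent to both board edges (wall[1]==1 and wall[1]+1==table_size[1] horizontally, resp. wall[0] vertically), A returns False because its counter check only runs inside the loops, while B returns True, the intended value: the two board edges count as two neighboring walls by the function's own boundary rule. — e.g. on is_wall_connected_with_two_or_more_walls((1, 1), true, (2, 2), ([], [])): A returns false, B returns true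
import Mathlib
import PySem

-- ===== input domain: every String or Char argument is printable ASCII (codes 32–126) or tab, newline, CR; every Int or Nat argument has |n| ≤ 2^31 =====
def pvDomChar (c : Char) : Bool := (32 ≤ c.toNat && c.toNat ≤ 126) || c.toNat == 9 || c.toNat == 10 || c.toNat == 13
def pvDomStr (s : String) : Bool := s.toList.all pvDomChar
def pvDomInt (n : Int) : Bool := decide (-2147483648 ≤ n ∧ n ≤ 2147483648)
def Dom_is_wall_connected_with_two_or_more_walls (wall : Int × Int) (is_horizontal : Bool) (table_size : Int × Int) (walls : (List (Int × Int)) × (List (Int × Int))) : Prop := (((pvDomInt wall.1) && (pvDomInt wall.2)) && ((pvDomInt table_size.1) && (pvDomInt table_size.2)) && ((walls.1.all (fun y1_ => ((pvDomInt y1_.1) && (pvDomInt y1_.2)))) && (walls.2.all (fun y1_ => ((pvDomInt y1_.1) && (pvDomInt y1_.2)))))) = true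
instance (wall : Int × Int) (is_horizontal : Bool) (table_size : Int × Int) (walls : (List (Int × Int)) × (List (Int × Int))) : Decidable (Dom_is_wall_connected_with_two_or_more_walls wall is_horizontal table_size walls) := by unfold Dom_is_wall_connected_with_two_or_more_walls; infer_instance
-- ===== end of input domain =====

-- B replaces A's scanning loops with fixed-point membership tests on the wall lists (simpler, loop-free);
-- on the degenerate corner where both wall lists are empty and the wall touches both board edges, A's
-- counter check never runs and it returns False, while B returns the intended True (see D_ below).

-- ===== PORT A =====
-- `counter = 0; for neighbor in [a,b,c]: if neighbor: counter += 1`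
def pvCountA (a b c : Bool) : Int :=
  List.foldl (fun acc n => if n then acc + 1 else acc) 0 [a, b, c]

-- one of A's four `for … in walls[i]` loops: flags (f1, m, f2) updated per element by the
-- predicates p (guarded, first flag), q (unguarded, middle), s (guarded, second flag), with
-- A's early `return True` (= none) when the counter reaches 2 after an element.
def pvLoopA (p q s : Int × Int → Bool) :
    List (Int × Int) → Bool → Bool → Bool → Option (Bool × Bool × Bool)
  | [], f1, m, f2 => some (f1, m, f2)
  | w :: ws, f1, m, f2 =>
    let f1' := if !f1 && p w then true else f1
    let f2' := if !f2 && s w then true else f2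
    let m' := if q w then true else m
    if pvCountA f1' m' f2' ≥ 2 then none
    else pvLoopA p q s ws f1' m' f2'

def is_wall_connected_with_two_or_more_walls (wall : Int × Int) (is_horizontal : Bool) (table_size : Int × Int) (walls : (List (Int × Int)) × (List (Int × Int))) : Bool :=
  if is_horizontal then
    let left0 : Bool := wall.2 == 1
    let right0 : Bool := wall.2 + 1 == table_size.2
    match pvLoopA (fun hw => hw.1 == wall.1 && hw.2 == wall.2 - 2)
                  (fun _ => false)
                  (fun hw => hw.1 == wall.1 && hw.2 == wall.2 + 2)
                  walls.2 left0 false right0 with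
    | none => true
    | some (l, m, r) =>
      match pvLoopA (fun vw => vw.2 == wall.2 - 1 && (vw.1 == wall.1 || vw.1 == wall.1 - 1 || vw.1 == wall.1 + 1))
                    (fun vw => vw.2 == wall.2 && (vw.1 == wall.1 + 1 || vw.1 == wall.1 - 1))
                    (fun vw => vw.2 == wall.2 + 1 && (vw.1 == wall.1 || vw.1 == wall.1 - 1 || vw.1 == wall.1 + 1))
                    walls.1 l m r with
      | none => true
      | some _ => false
  else
    let top0 : Bool := wall.1 == 1
    let bottom0 : Bool := wall.1 + 1 == table_size.1
    match pvLoopA (fun hw => hw.1 == wall.1 - 1 && (hw.2 == wall.2 || hw.2 == wall.2 - 1 || hw.2 == wall.2 + 1))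
                  (fun hw => hw.1 == wall.1 && (hw.2 == wall.2 + 1 || hw.2 == wall.2 - 1))
                  (fun hw => hw.1 == wall.1 + 1 && (hw.2 == wall.2 || hw.2 == wall.2 - 1 || hw.2 == wall.2 + 1))
                  walls.2 top0 false bottom0 with
    | none => true
    | some (t, m, b) =>
      match pvLoopA (fun vw => vw.2 == wall.2 && vw.1 == wall.1 - 2)
                    (fun _ => false)
                    (fun vw => vw.2 == wall.2 && vw.1 == wall.1 + 2)
                    walls.1 t m b with
      | none => true
      | some _ => false

-- ===== PORT B =====
def is_wall_connected_with_two_or_more_walls_alt (wall : Int × Int) (is_horizontal : Bool) (table_size : Int × Int) (walls : (List (Int × Int)) × (List (Int × Int))) : Bool :=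
  let vertical := walls.1
  let horizontal := walls.2
  let r := wall.1
  let c := wall.2
  let flags : Bool × Bool × Bool :=
    if is_horizontal then
      (c == 1 || horizontal.contains (r, c - 2)
         || vertical.contains (r - 1, c - 1) || vertical.contains (r, c - 1) || vertical.contains (r + 1, c - 1),
       vertical.contains (r - 1, c) || vertical.contains (r + 1, c),
       c + 1 == table_size.2 || horizontal.contains (r, c + 2)
         || vertical.contains (r - 1, c + 1) || vertical.contains (r, c + 1) || vertical.contains (r + 1, c + 1))
    else
      (r == 1 || vertical.contains (r - 2, c)
         || horizontal.contains (r - 1, c - 1) || horizontal.contains (r - 1, c) || horizontal.contains (r - 1, c + 1),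
       horizontal.contains (r, c - 1) || horizontal.contains (r, c + 1),
       r + 1 == table_size.1 || vertical.contains (r + 2, c)
         || horizontal.contains (r + 1, c - 1) || horizontal.contains (r + 1, c) || horizontal.contains (r + 1, c + 1))
  decide ((if flags.1 then (1 : Int) else 0) + (if flags.2.1 then 1 else 0) + (if flags.2.2 then 1 else 0) ≥ 2)

-- ===== PRECONDITION & SPEC =====
-- When both wall lists are empty and the wall is adjacent to both board edges, A returns False (its
-- counter check sits inside the loops and never runs), while B returns the intended True: a wall
-- touching two board edges is connected to two "walls" by the function's own boundary rule.
def D_is_wall_connected_with_two_or_more_walls (wall : Int × Int) (is_horizontal : Bool) (table_size : Int × Int) (walls : (List (Int × Int)) × (List (Int × Int))) : Prop :=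
  walls.1 = [] ∧ walls.2 = [] ∧
    (if is_horizontal then wall.2 = 1 ∧ wall.2 + 1 = table_size.2
     else wall.1 = 1 ∧ wall.1 + 1 = table_size.1)
instance (wall : Int × Int) (is_horizontal : Bool) (table_size : Int × Int) (walls : (List (Int × Int)) × (List (Int × Int))) : Decidable (D_is_wall_connected_with_two_or_more_walls wall is_horizontal table_size walls) := by unfold D_is_wall_connected_with_two_or_more_walls; infer_instance

def Spec_is_wall_connected_with_two_or_more_walls (wall : Int × Int) (is_horizontal : Bool) (table_size : Int × Int) (walls : (List (Int × Int)) × (List (Int × Int))) (out : Bool) : Prop := ¬ D_is_wall_connected_with_two_or_more_walls wall is_horizontal table_size walls → out = is_wall_connected_with_two_or_more_walls_alt wall is_horizontal table_size walls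
instance (wall : Int × Int) (is_horizontal : Bool) (table_size : Int × Int) (walls : (List (Int × Int)) × (List (Int × Int))) (out : Bool) : Decidable (Spec_is_wall_connected_with_two_or_more_walls wall is_horizontal table_size walls out) := by unfold Spec_is_wall_connected_with_two_or_more_walls; infer_instance

def pvDiffWitness_is_wall_connected_with_two_or_more_walls : (Int × Int) × Bool × (Int × Int) × ((List (Int × Int)) × (List (Int × Int))) := ((1, 1), true, (2, 2), ([], []))
def pvDiffWitnessOut_is_wall_connected_with_two_or_more_walls : Bool × Bool := (false, true)

-- ===== CLAIM (what is proved, stated in full; the proofs are below) =====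
def Claim_unchanged_is_wall_connected_with_two_or_more_walls : Prop := ∀ (wall : Int × Int) (is_horizontal : Bool) (table_size : Int × Int) (walls : (List (Int × Int)) × (List (Int × Int))), Dom_is_wall_connected_with_two_or_more_walls wall is_horizontal table_size walls → Spec_is_wall_connected_with_two_or_more_walls wall is_horizontal table_size walls (is_wall_connected_with_two_or_more_walls wall is_horizontal table_size walls)
def Claim_changed_is_wall_connected_with_two_or_more_walls : Prop := Dom_is_wall_connected_with_two_or_more_walls (pvDiffWitness_is_wall_connected_with_two_or_more_walls.1) (pvDiffWitness_is_wall_connected_with_two_or_more_walls.2.1) (pvDiffWitness_is_wall_connected_with_two_or_more_walls.2.2.1) (pvDiffWitness_is_wall_connected_with_two_or_more_walls.2.2.2) ∧ D_is_wall_connected_with_two_or_more_walls (pvDiffWitness_is_wall_connected_with_two_or_more_walls.1) (pvDiffWitness_is_wall_connected_with_two_or_more_walls.2.1) (pvDiffWitness_is_wall_connected_with_two_or_more_walls.2.2.1) (pvDiffWitness_is_wall_connected_with_two_or_more_walls.2.2.2) ∧ is_wall_connected_with_two_or_more_walls (pvDiffWitness_is_wall_connected_with_two_or_more_walls.1) (pvDiffWitness_is_wall_connected_with_two_or_more_walls.2.1)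 (pvDiffWitness_is_wall_connected_with_two_or_more_walls.2.2.1) (pvDiffWitness_is_wall_connected_with_two_or_more_walls.2.2.2) = pvDiffWitnessOut_is_wall_connected_with_two_or_more_walls.1 ∧ is_wall_connected_with_two_or_more_walls_alt (pvDiffWitness_is_wall_connected_with_two_or_more_walls.1) (pvDiffWitness_is_wall_connected_with_two_or_more_walls.2.1) (pvDiffWitness_is_wall_connected_with_two_or_more_walls.2.2.1) (pvDiffWitness_is_wall_connected_with_two_or_more_walls.2.2.2) = pvDiffWitnessOut_is_wall_connected_with_two_or_more_walls.2 ∧ pvDiffWitnessOut_is_wall_connected_with_two_or_more_walls.1 ≠ pvDiffWitnessOut_is_wall_connected_with_two_or_more_walls.2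
def Claim_exact_is_wall_connected_with_two_or_more_walls : Prop := ∀ (wall : Int × Int) (is_horizontal : Bool) (table_size : Int × Int) (walls : (List (Int × Int)) × (List (Int × Int))), Dom_is_wall_connected_with_two_or_more_walls wall is_horizontal table_size walls → D_is_wall_connected_with_two_or_more_walls wall is_horizontal table_size walls → is_wall_connected_with_two_or_more_walls wall is_horizontal table_size walls ≠ is_wall_connected_with_two_or_more_walls_alt wall is_horizontal table_size walls

-- ===== LEMMAS AND PROOFS =====

-- the flags are or-accumulated
lemma pvOr_notand (b c : Bool) : (b || (!b && c)) = (b || c) := by cases b <;> cases c <;> rfl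
lemma pvFlag_or' (b c : Bool) : (if c then true else b) = (b || c) := by cases b <;> cases c <;> rfl

lemma pvCountA_ge (a b c : Bool) : (pvCountA a b c ≥ 2) ↔ (a && b || a && c || b && c) = true := by
  cases a <;> cases b <;> cases c <;> simp [pvCountA]

lemma pvCountA_or_mono {a b c x y z : Bool} (h : pvCountA a b c ≥ 2) :
    pvCountA (a || x) (b || y) (c || z) ≥ 2 := by
  rw [pvCountA_ge] at h ⊢
  revert h; revert a b c x y z; decide

lemma pvLoopA_char (p q s : Int × Int → Bool) (ws : List (Int × Int)) (f1 m f2 : Bool) :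
    pvLoopA p q s ws f1 m f2 =
      if ws = [] then some (f1, m, f2)
      else if pvCountA (f1 || ws.any p) (m || ws.any q) (f2 || ws.any s) ≥ 2 then none
      else some (f1 || ws.any p, m || ws.any q, f2 || ws.any s) := by
  induction ws generalizing f1 m f2 with
  | nil => simp [pvLoopA]
  | cons w ws ih =>
    simp only [pvLoopA, pvFlag_or', pvOr_notand, List.any_cons]
    by_cases h : pvCountA (f1 || p w) (m || q w) (f2 || s w) ≥ 2
    · have h2 : pvCountA (f1 || (p w || ws.any p)) (m || (q w || ws.any q)) (f2 || (s w || ws.any s)) ≥ 2 := by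
        simp only [← Bool.or_assoc]; exact pvCountA_or_mono h
      simp [h, h2]
    · rw [if_neg h, ih]
      rcases ws with _ | ⟨w', ws'⟩
      · simp [h]
      · simp only [List.any_cons, Bool.or_assoc]; simp

-- composed closed form of A's two consecutive loops (first loop never sets the middle flag)
lemma pv_branch (p1 s1 p2 q2 s2 : Int × Int → Bool) (wsA wsB : List (Int × Int)) (f0 g0 : Bool) :
    (match pvLoopA p1 (fun _ => false) s1 wsA f0 false g0 with
     | none => true
     | some (l, m, r) =>
       match pvLoopA p2 q2 s2 wsB l m r with
       | none => true
       | some _ => false) =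
      if wsA = [] ∧ wsB = [] then false
      else
        (let F := f0 || wsA.any p1 || wsB.any p2
         let M := wsB.any q2
         let G := g0 || wsA.any s1 || wsB.any s2
         F && M || F && G || M && G) := by
  rw [pvLoopA_char]
  by_cases hA : wsA = []
  · subst hA
    simp only [List.any_nil, Bool.or_false, true_and]
    rw [if_pos trivial]
    dsimp only
    rw [pvLoopA_char]
    by_cases hB : wsB = []
    · subst hB; simp
    · simp only [if_neg hB]
      generalize wsB.any p2 = XB
      generalize wsB.any q2 = YB
      generalize wsB.any s2 = ZB
      by_cases h : pvCountA (f0 || XB) (false || YB) (g0 || ZB) ≥ 2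
      · rw [if_pos h]
        have h' := (pvCountA_ge _ _ _).mp h
        dsimp only
        revert h'; revert f0 g0 XB YB ZB; decide
      · rw [if_neg h]
        have h' : ((f0 || XB) && (false || YB) || (f0 || XB) && (g0 || ZB) || (false || YB) && (g0 || ZB)) = false := by
          cases hx : ((f0 || XB) && (false || YB) || (f0 || XB) && (g0 || ZB) || (false || YB) && (g0 || ZB))
          · rfl
          · exact absurd ((pvCountA_ge _ _ _).mpr hx) h
        dsimp only
        revert h'; revert f0 g0 XB YB ZB; decide
  · rw [if_neg (by simp [hA] : ¬ (wsA = [] ∧ wsB = []))]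
    rw [if_neg hA]
    have hf : wsA.any (fun _ => false) = false := by simp
    rw [hf]
    generalize wsA.any p1 = XA
    generalize wsA.any s1 = ZA
    by_cases h1 : pvCountA (f0 || XA) (false || false) (g0 || ZA) ≥ 2
    · rw [if_pos h1]
      have h1' := (pvCountA_ge _ _ _).mp h1
      dsimp only
      generalize wsB.any p2 = XB
      generalize wsB.any q2 = YB
      generalize wsB.any s2 = ZB
      revert h1'; revert f0 g0 XA ZA XB YB ZB; decide
    · rw [if_neg h1]
      dsimp only
      rw [pvLoopA_char]
      have h1' : ((f0 || XA) && (false || false) || (f0 || XA) && (g0 || ZA) || (false || false) && (g0 || ZA)) = false := by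
        cases hx : ((f0 || XA) && (false || false) || (f0 || XA) && (g0 || ZA) || (false || false) && (g0 || ZA))
        · rfl
        · exact absurd ((pvCountA_ge _ _ _).mpr hx) h1
      by_cases hB : wsB = []
      · subst hB
        rw [if_pos rfl]
        dsimp only
        simp only [List.any_nil, Bool.or_false]
        revert h1'; revert f0 g0 XA ZA; decide
      · rw [if_neg hB]
        generalize wsB.any p2 = XB
        generalize wsB.any q2 = YB
        generalize wsB.any s2 = ZB
        by_cases h2 : pvCountA (f0 || XA || XB) (false || false || YB) (g0 || ZA || ZB) ≥ 2
        · rw [if_pos h2]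
          have h2' := (pvCountA_ge _ _ _).mp h2
          dsimp only
          revert h2'; revert f0 g0 XA ZA XB YB ZB; decide
        · rw [if_neg h2]
          have h2' : ((f0 || XA || XB) && (false || false || YB) || (f0 || XA || XB) && (g0 || ZA || ZB) || (false || false || YB) && (g0 || ZA || ZB)) = false := by
            cases hx : ((f0 || XA || XB) && (false || false || YB) || (f0 || XA || XB) && (g0 || ZA || ZB) || (false || false || YB) && (g0 || ZA || ZB))
            · rfl
            · exact absurd ((pvCountA_ge _ _ _).mpr hx) h2
          dsimp only
          revert h2'; revert f0 g0 XA ZA XB YB ZB; decide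

-- composed closed form for the vertical branch (second loop never sets the middle flag)
lemma pv_branch' (p1 q1 s1 p2 s2 : Int × Int → Bool) (wsA wsB : List (Int × Int)) (f0 g0 : Bool) :
    (match pvLoopA p1 q1 s1 wsA f0 false g0 with
     | none => true
     | some (l, m, r) =>
       match pvLoopA p2 (fun _ => false) s2 wsB l m r with
       | none => true
       | some _ => false) =
      if wsA = [] ∧ wsB = [] then false
      else
        (let F := f0 || wsA.any p1 || wsB.any p2
         let M := wsA.any q1
         let G := g0 || wsA.any s1 || wsB.any s2
         F && M || F && G || M && G) := by
  rw [pvLoopA_char]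
  by_cases hA : wsA = []
  · subst hA
    simp only [List.any_nil, Bool.or_false, true_and]
    rw [if_pos trivial]
    dsimp only
    rw [pvLoopA_char]
    have hf2 : wsB.any (fun _ => false) = false := by simp
    rw [hf2]
    by_cases hB : wsB = []
    · subst hB; simp
    · simp only [if_neg hB]
      generalize wsB.any p2 = XB
      generalize wsB.any s2 = ZB
      by_cases h : pvCountA (f0 || XB) (false || false) (g0 || ZB) ≥ 2
      · rw [if_pos h]
        have h' := (pvCountA_ge _ _ _).mp h
        dsimp only
        revert h'; revert f0 g0 XB ZB; decide
      · rw [if_neg h]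
        have h' : ((f0 || XB) && (false || false) || (f0 || XB) && (g0 || ZB) || (false || false) && (g0 || ZB)) = false := by
          cases hx : ((f0 || XB) && (false || false) || (f0 || XB) && (g0 || ZB) || (false || false) && (g0 || ZB))
          · rfl
          · exact absurd ((pvCountA_ge _ _ _).mpr hx) h
        dsimp only
        revert h'; revert f0 g0 XB ZB; decide
  · rw [if_neg (by simp [hA] : ¬ (wsA = [] ∧ wsB = []))]
    rw [if_neg hA]
    generalize wsA.any p1 = XA
    generalize wsA.any q1 = YA
    generalize wsA.any s1 = ZA
    by_cases h1 : pvCountA (f0 || XA) (false || YA) (g0 || ZA) ≥ 2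
    · rw [if_pos h1]
      have h1' := (pvCountA_ge _ _ _).mp h1
      dsimp only
      generalize wsB.any p2 = XB
      generalize wsB.any s2 = ZB
      revert h1'; revert f0 g0 XA YA ZA XB ZB; decide
    · rw [if_neg h1]
      dsimp only
      rw [pvLoopA_char]
      have hf2 : wsB.any (fun _ => false) = false := by simp
      rw [hf2]
      have h1' : ((f0 || XA) && (false || YA) || (f0 || XA) && (g0 || ZA) || (false || YA) && (g0 || ZA)) = false := by
        cases hx : ((f0 || XA) && (false || YA) || (f0 || XA) && (g0 || ZA) || (false || YA) && (g0 || ZA))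
        · rfl
        · exact absurd ((pvCountA_ge _ _ _).mpr hx) h1
      by_cases hB : wsB = []
      · subst hB
        rw [if_pos rfl]
        dsimp only
        simp only [List.any_nil, Bool.or_false]
        revert h1'; revert f0 g0 XA YA ZA; decide
      · rw [if_neg hB]
        generalize wsB.any p2 = XB
        generalize wsB.any s2 = ZB
        by_cases h2 : pvCountA (f0 || XA || XB) (false || YA || false) (g0 || ZA || ZB) ≥ 2
        · rw [if_pos h2]
          have h2' := (pvCountA_ge _ _ _).mp h2
          dsimp only
          revert h2'; revert f0 g0 XA YA ZA XB ZB; decide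
        · rw [if_neg h2]
          have h2' : ((f0 || XA || XB) && (false || YA || false) || (f0 || XA || XB) && (g0 || ZA || ZB) || (false || YA || false) && (g0 || ZA || ZB)) = false := by
            cases hx : ((f0 || XA || XB) && (false || YA || false) || (f0 || XA || XB) && (g0 || ZA || ZB) || (false || YA || false) && (g0 || ZA || ZB))
            · rfl
            · exact absurd ((pvCountA_ge _ _ _).mpr hx) h2
          dsimp only
          revert h2'; revert f0 g0 XA YA ZA XB ZB; decide

lemma pvBeq_pair (a b x1 x2 : Int) : ((a, b) == (x1, x2)) = (a == x1 && b == x2) := rfl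

lemma pvContains_any (xs : List (Int × Int)) (a b : Int) :
    xs.contains (a, b) = xs.any (fun w => w.1 == a && w.2 == b) := by
  induction xs with
  | nil => rfl
  | cons x xs ih =>
    simp only [List.contains_cons, List.any_cons, ← ih]
    cases x with
    | mk x1 x2 =>
      rw [pvBeq_pair, show (x1 == a) = (a == x1) from BEq.comm,
        show (x2 == b) = (b == x2) from BEq.comm]

lemma pvContains_any' (xs : List (Int × Int)) (a b : Int) :
    xs.contains (a, b) = xs.any (fun w => w.2 == b && w.1 == a) := by
  rw [pvContains_any]
  induction xs with
  | nil => rfl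
  | cons x xs ih => simp only [List.any_cons, ih, Bool.and_comm]

lemma pvAny_triple1 (xs : List (Int × Int)) (a c : Int) :
    xs.any (fun w => w.2 == c && (w.1 == a || w.1 == a - 1 || w.1 == a + 1)) =
      (xs.contains (a - 1, c) || xs.contains (a, c) || xs.contains (a + 1, c)) := by
  rw [Bool.eq_iff_iff]
  simp only [List.any_eq_true, Bool.and_eq_true, Bool.or_eq_true, beq_iff_eq,
    List.contains_iff_mem]
  constructor
  · rintro ⟨⟨w1, w2⟩, hm, h2, h1⟩
    dsimp only at h1 h2; subst h2
    rcases h1 with (h | h) | h <;> subst h <;> tauto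
  · rintro ((h | h) | h)
    · exact ⟨(a - 1, c), h, rfl, by tauto⟩
    · exact ⟨(a, c), h, rfl, by tauto⟩
    · exact ⟨(a + 1, c), h, rfl, by tauto⟩

lemma pvAny_triple2 (xs : List (Int × Int)) (a c : Int) :
    xs.any (fun w => w.1 == a && (w.2 == c || w.2 == c - 1 || w.2 == c + 1)) =
      (xs.contains (a, c - 1) || xs.contains (a, c) || xs.contains (a, c + 1)) := by
  rw [Bool.eq_iff_iff]
  simp only [List.any_eq_true, Bool.and_eq_true, Bool.or_eq_true, beq_iff_eq,
    List.contains_iff_mem]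
  constructor
  · rintro ⟨⟨w1, w2⟩, hm, h1, h2⟩
    dsimp only at h1 h2; subst h1
    rcases h2 with (h | h) | h <;> subst h <;> tauto
  · rintro ((h | h) | h)
    · exact ⟨(a, c - 1), h, rfl, by tauto⟩
    · exact ⟨(a, c), h, rfl, by tauto⟩
    · exact ⟨(a, c + 1), h, rfl, by tauto⟩

lemma pvAny_mid1 (xs : List (Int × Int)) (a c : Int) :
    xs.any (fun w => w.2 == c && (w.1 == a + 1 || w.1 == a - 1)) =
      (xs.contains (a - 1, c) || xs.contains (a + 1, c)) := by
  rw [Bool.eq_iff_iff]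
  simp only [List.any_eq_true, Bool.and_eq_true, Bool.or_eq_true, beq_iff_eq,
    List.contains_iff_mem]
  constructor
  · rintro ⟨⟨w1, w2⟩, hm, h2, h1⟩
    dsimp only at h1 h2; subst h2
    rcases h1 with h | h <;> subst h <;> tauto
  · rintro (h | h)
    · exact ⟨(a - 1, c), h, rfl, by tauto⟩
    · exact ⟨(a + 1, c), h, rfl, by tauto⟩

lemma pvAny_mid2 (xs : List (Int × Int)) (a c : Int) :
    xs.any (fun w => w.1 == a && (w.2 == c + 1 || w.2 == c - 1)) =
      (xs.contains (a, c - 1) || xs.contains (a, c + 1)) := by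
  rw [Bool.eq_iff_iff]
  simp only [List.any_eq_true, Bool.and_eq_true, Bool.or_eq_true, beq_iff_eq,
    List.contains_iff_mem]
  constructor
  · rintro ⟨⟨w1, w2⟩, hm, h1, h2⟩
    dsimp only at h1 h2; subst h1
    rcases h2 with h | h <;> subst h <;> tauto
  · rintro (h | h)
    · exact ⟨(a, c - 1), h, rfl, by tauto⟩
    · exact ⟨(a, c + 1), h, rfl, by tauto⟩

-- count ≥ 2 as chk on bools
lemma pvCount_decide (a b c : Bool) :
    decide ((if a then (1 : Int) else 0) + (if b then 1 else 0) + (if c then 1 else 0) ≥ 2) =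
      (a && b || a && c || b && c) := by
  cases a <;> cases b <;> cases c <;> decide

theorem pv_main : ∀ (wall : Int × Int) (is_horizontal : Bool) (table_size : Int × Int)
    (walls : (List (Int × Int)) × (List (Int × Int))),
    ¬ D_is_wall_connected_with_two_or_more_walls wall is_horizontal table_size walls →
    is_wall_connected_with_two_or_more_walls wall is_horizontal table_size walls =
      is_wall_connected_with_two_or_more_walls_alt wall is_horizontal table_size walls := by
  intro wall ih ts walls hD
  obtain ⟨vs, hs⟩ := walls
  cases ih with
  | true =>
    simp only [is_wall_connected_with_two_or_more_walls,
      is_wall_connected_with_two_or_more_walls_alt, if_true]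
    rw [pv_branch]
    rw [pvCount_decide, pvAny_triple1, pvAny_triple1, pvAny_mid1,
      ← pvContains_any, ← pvContains_any]
    by_cases hE : hs = [] ∧ vs = []
    · obtain ⟨h1, h2⟩ := hE; subst h1; subst h2
      have hnb : ¬ (wall.2 = 1 ∧ wall.2 + 1 = ts.2) := fun hc =>
        hD ⟨rfl, rfl, by simpa using hc⟩
      rw [if_pos ⟨rfl, rfl⟩]
      simp only [List.contains_nil, Bool.or_false]
      by_cases hb1 : wall.2 = 1 <;> by_cases hb2 : wall.2 + 1 = ts.2 <;>
        simp_all [beq_iff_eq]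
    · rw [if_neg hE]
      generalize (wall.2 == 1 : Bool) = b1
      generalize (wall.2 + 1 == ts.2 : Bool) = b2
      generalize hs.contains (wall.1, wall.2 - 2) = hL
      generalize hs.contains (wall.1, wall.2 + 2) = hR
      generalize vs.contains (wall.1 - 1, wall.2 - 1) = v1
      generalize vs.contains (wall.1, wall.2 - 1) = v2
      generalize vs.contains (wall.1 + 1, wall.2 - 1) = v3
      generalize vs.contains (wall.1 - 1, wall.2) = v4
      generalize vs.contains (wall.1 + 1, wall.2) = v5
      generalize vs.contains (wall.1 - 1, wall.2 + 1) = v6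
      generalize vs.contains (wall.1, wall.2 + 1) = v7
      generalize vs.contains (wall.1 + 1, wall.2 + 1) = v8
      revert b1 b2 hL hR v1 v2 v3 v4 v5 v6 v7 v8; decide
  | false =>
    simp only [is_wall_connected_with_two_or_more_walls,
      is_wall_connected_with_two_or_more_walls_alt, Bool.false_eq_true, if_false]
    rw [pv_branch']
    rw [pvCount_decide, pvAny_triple2, pvAny_triple2, pvAny_mid2,
      ← pvContains_any', ← pvContains_any']
    by_cases hE : hs = [] ∧ vs = []
    · obtain ⟨h1, h2⟩ := hE; subst h1; subst h2
      have hnb : ¬ (wall.1 = 1 ∧ wall.1 + 1 = ts.1) := fun hc =>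
        hD ⟨rfl, rfl, by simpa using hc⟩
      rw [if_pos ⟨rfl, rfl⟩]
      simp only [List.contains_nil, Bool.or_false]
      by_cases hb1 : wall.1 = 1 <;> by_cases hb2 : wall.1 + 1 = ts.1 <;>
        simp_all [beq_iff_eq]
    · rw [if_neg hE]
      generalize (wall.1 == 1 : Bool) = b1
      generalize (wall.1 + 1 == ts.1 : Bool) = b2
      generalize vs.contains (wall.1 - 2, wall.2) = vT
      generalize vs.contains (wall.1 + 2, wall.2) = vB
      generalize hs.contains (wall.1 - 1, wall.2 - 1) = h1
      generalize hs.contains (wall.1 - 1, wall.2) = h2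
      generalize hs.contains (wall.1 - 1, wall.2 + 1) = h3
      generalize hs.contains (wall.1, wall.2 - 1) = h4
      generalize hs.contains (wall.1, wall.2 + 1) = h5
      generalize hs.contains (wall.1 + 1, wall.2 - 1) = h6
      generalize hs.contains (wall.1 + 1, wall.2) = h7
      generalize hs.contains (wall.1 + 1, wall.2 + 1) = h8
      revert b1 b2 vT vB h1 h2 h3 h4 h5 h6 h7 h8; decide

-- ===== VERDICT (by name: the statement is the Claim_ definition above) =====
theorem is_wall_connected_with_two_or_more_walls_spec : Claim_unchanged_is_wall_connected_with_two_or_more_walls := by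
  intro wall ih ts walls _ hD
  exact pv_main wall ih ts walls hD

theorem is_wall_connected_with_two_or_more_walls_changed : Claim_changed_is_wall_connected_with_two_or_more_walls := by
  unfold Claim_changed_is_wall_connected_with_two_or_more_walls; decide

theorem is_wall_connected_with_two_or_more_walls_tight : Claim_exact_is_wall_connected_with_two_or_more_walls := by
  intro wall ih ts walls _ hD
  obtain ⟨h1, h2, h3⟩ := hD
  cases ih <;> simp_all [is_wall_connected_with_two_or_more_walls,
    is_wall_connected_with_two_or_more_walls_alt, pvLoopA, h3.1]
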